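-- pv_equiv track=rewrite | github.com/tao-dot-com/patrol_subnet | miner/local_dev/utility/find_high_level_groupings.py | compute_runtime_ranges
-- ===== SOURCE A (Python) =====
-- def compute_runtime_ranges(results):
--     """
--     Given a list of block info dictionaries (each with 'block_number' and 'runtime_version'),
--     compute the min and max block number for each runtime version.
--     """
--     runtime_ranges = {}
--     for entry in results:
--         rt = entry["runtime_version"]
--         bn = entry["block_number"]
--         if rt in runtime_ranges:
--             runtime_ranges[rt]["min"] = min(runtime_ranges[rt]["min"], bn)
--             runtime_ranges[rt]["max"] = max(runtime_ranges[rt]["max"], bn)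
--         else:
--             runtime_ranges[rt] = {"min": bn, "max": bn}
--     return runtime_ranges
-- ===== SOURCE B (Python) =====
-- def compute_runtime_ranges(results):
--     """
--     Given a list of block info dictionaries (each with 'block_number' and 'runtime_version'),
--     compute the min and max block number for each runtime version.
--     """
--     groups = {}
--     for entry in results:
--         groups.setdefault(entry["runtime_version"], []).append(entry["block_number"])
--     return {rt: {"min": min(nums), "max": max(nums)} for rt, nums in groups.items()}
-- ===== Notes on version B (the rewrite author's own statement) =====
-- stated objective: idiomatic
-- what changed: B first groups all block numbers per runtime version with setdefault/append, then computes min/max once per group in a comprehension, instead of folding running min/max scalars inside the main loop.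
import Mathlib
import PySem

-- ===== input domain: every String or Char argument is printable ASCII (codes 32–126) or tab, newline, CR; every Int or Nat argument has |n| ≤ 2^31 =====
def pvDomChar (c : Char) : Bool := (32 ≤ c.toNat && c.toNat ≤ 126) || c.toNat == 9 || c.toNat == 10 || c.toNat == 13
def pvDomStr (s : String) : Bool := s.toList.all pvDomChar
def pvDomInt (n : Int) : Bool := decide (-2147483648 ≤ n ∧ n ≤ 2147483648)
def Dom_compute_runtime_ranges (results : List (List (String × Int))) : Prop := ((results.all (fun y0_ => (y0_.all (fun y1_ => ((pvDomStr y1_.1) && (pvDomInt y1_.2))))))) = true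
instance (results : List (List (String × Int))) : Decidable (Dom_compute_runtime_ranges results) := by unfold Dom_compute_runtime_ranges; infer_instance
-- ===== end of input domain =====

-- B groups all block numbers per runtime version first, then computes min/max once per group,
-- instead of A's running min/max scalars maintained inside the main loop (same cost, different decomposition).


-- ===== PORT A =====
-- one loop step of A: read rt/bn, update running min/max (or seed {"min": bn, "max": bn})
def crrAStep (runtime_ranges : PySem.Dict Int (PySem.Dict String Int)) (entry : List (String × Int)) :
    PySem.Dict Int (PySem.Dict String Int) :=
  let e := PySem.Dict.mk entry
  let rt := e.getD "runtime_version" 0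
  let bn := e.getD "block_number" 0
  if runtime_ranges.contains rt then
    let cur := runtime_ranges.getD rt PySem.Dict.empty
    let cur1 := cur.insert "min" (min (cur.getD "min" 0) bn)
    let cur2 := cur1.insert "max" (max (cur1.getD "max" 0) bn)
    runtime_ranges.insert rt cur2
  else
    runtime_ranges.insert rt (PySem.Dict.mk [("min", bn), ("max", bn)])

def compute_runtime_ranges (results : List (List (String × Int))) : List (Int × List (String × Int)) :=
  ((results.foldl crrAStep PySem.Dict.empty).items.map (fun p => (p.1, p.2.items)))

-- ===== PORT B =====
-- one loop step of B: groups.setdefault(rt, []).append(bn)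
def crrBStep (groups : PySem.Dict Int (List Int)) (entry : List (String × Int)) :
    PySem.Dict Int (List Int) :=
  let e := PySem.Dict.mk entry
  groups.modify (e.getD "runtime_version" 0) [] (· ++ [e.getD "block_number" 0])

def compute_runtime_ranges_alt (results : List (List (String × Int))) : List (Int × List (String × Int)) :=
  let groups := results.foldl crrBStep PySem.Dict.empty
  groups.items.map (fun p =>
    (p.1, [("min", (PySem.List.min? p.2 (fun y => y)).getD 0),
           ("max", (PySem.List.max? p.2 (fun y => y)).getD 0)]))

-- ===== PRECONDITION & SPEC =====
-- Pre_ excludes exactly the entries on which Python A raises KeyError: an entry dict missing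
-- the "runtime_version" or "block_number" key.
def Pre_compute_runtime_ranges (results : List (List (String × Int))) : Prop :=
  ∀ e ∈ results, (PySem.Dict.mk e).contains "runtime_version" = true ∧ (PySem.Dict.mk e).contains "block_number" = true
instance (results : List (List (String × Int))) : Decidable (Pre_compute_runtime_ranges results) := by unfold Pre_compute_runtime_ranges; infer_instance
def pvWitness_compute_runtime_ranges : (List (List (String × Int))) :=
  [[("runtime_version", 1), ("block_number", 5)], [("runtime_version", 1), ("block_number", 2)]]

def Spec_compute_runtime_ranges (results : List (List (String × Int))) (out : List (Int × List (String × Int))) : Prop := out = compute_runtime_ranges_alt results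
instance (results : List (List (String × Int))) (out : List (Int × List (String × Int))) : Decidable (Spec_compute_runtime_ranges results out) := by unfold Spec_compute_runtime_ranges; infer_instance

-- ===== CLAIM (what is proved, stated in full; the proofs are below) =====
def Claim_equal_compute_runtime_ranges : Prop := ∀ (results : List (List (String × Int))), Dom_compute_runtime_ranges results → Pre_compute_runtime_ranges results → Spec_compute_runtime_ranges results (compute_runtime_ranges results)

-- ===== LEMMAS AND PROOFS =====

-- the min/max summary of a group, as A's inner dict
def crrMM (nums : List Int) : PySem.Dict String Int :=
  PySem.Dict.mk [("min", (PySem.List.min? nums (fun y => y)).getD 0),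
                 ("max", (PySem.List.max? nums (fun y => y)).getD 0)]

def crrLiftFn (p : Int × List Int) : Int × PySem.Dict String Int := (p.1, crrMM p.2)

def crrLift (g : PySem.Dict Int (List Int)) : PySem.Dict Int (PySem.Dict String Int) :=
  PySem.Dict.mk (g.items.map crrLiftFn)

theorem crrLift_contains (g : PySem.Dict Int (List Int)) (k : Int) :
    (crrLift g).contains k = g.contains k := by
  simp only [crrLift, PySem.Dict.contains, List.any_map]
  rfl

theorem crr_find_map (l : List (Int × List Int)) (k : Int) :
    List.find? (fun p => p.1 == k) (l.map crrLiftFn) =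
      (List.find? (fun p => p.1 == k) l).map crrLiftFn := by
  induction l with
  | nil => rfl
  | cons p t ih =>
    by_cases h : p.1 == k
    · simp [crrLiftFn, h]
    · simp only [List.map_cons, List.find?_cons]
      have h1 : ((crrLiftFn p).1 == k) = false := by simpa [crrLiftFn] using h
      have h2 : (p.1 == k) = false := by simpa using h
      rw [h1, h2]
      exact ih

theorem crrLift_get? (g : PySem.Dict Int (List Int)) (k : Int) :
    (crrLift g).get? k = (g.get? k).map crrMM := by
  simp only [crrLift, PySem.Dict.get?, crr_find_map]
  cases List.find? (fun p => p.1 == k) g.items <;> simp [crrLiftFn]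

theorem crrLift_insert (g : PySem.Dict Int (List Int)) (k : Int) (v : List Int) :
    crrLift (g.insert k v) = (crrLift g).insert k (crrMM v) := by
  cases hc : g.contains k with
  | true =>
    have hc' : (crrLift g).contains k = true := by rw [crrLift_contains]; exact hc
    apply PySem.Dict.ext
    rw [show (crrLift (g.insert k v)).items = (g.insert k v).items.map crrLiftFn from rfl,
        PySem.Dict.items_insert_of_contains _ _ hc,
        PySem.Dict.items_insert_of_contains _ _ hc']
    rw [show (crrLift g).items = g.items.map crrLiftFn from rfl]
    simp only [List.map_map]
    apply List.map_congr_left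
    intro p _
    by_cases h : p.1 == k <;> simp [crrLiftFn, Function.comp, h]
  | false =>
    have hc' : (crrLift g).contains k = false := by rw [crrLift_contains]; exact hc
    apply PySem.Dict.ext
    rw [show (crrLift (g.insert k v)).items = (g.insert k v).items.map crrLiftFn from rfl,
        PySem.Dict.items_insert_of_not_contains _ _ hc,
        PySem.Dict.items_insert_of_not_contains _ _ hc']
    simp [crrLift, crrLiftFn]

theorem crrMM_step (h0 : Int) (t : List Int) (bn : Int) :
    ((crrMM (h0 :: t)).insert "min" (min ((crrMM (h0 :: t)).getD "min" 0) bn)).insert "max"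
      (max (((crrMM (h0 :: t)).insert "min"
        (min ((crrMM (h0 :: t)).getD "min" 0) bn)).getD "max" 0) bn)
      = crrMM ((h0 :: t) ++ [bn]) := by
  rw [show (h0 :: t) ++ [bn] = h0 :: (t ++ [bn]) from rfl]
  simp only [crrMM, PySem.List.min?_id_cons, PySem.List.max?_id_cons, List.foldl_append,
    List.foldl_cons, List.foldl_nil, Option.getD_some]
  apply PySem.Dict.ext
  simp [PySem.Dict.getD, PySem.Dict.get?, PySem.Dict.insert, PySem.Dict.contains]

-- the loop invariant: A's dict is the lifted image of B's grouping dict (all groups nonempty)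
theorem crr_loop (l : List (List (String × Int))) :
    ∀ (g : PySem.Dict Int (List Int)), (∀ p ∈ g.items, p.2 ≠ []) →
      l.foldl crrAStep (crrLift g) = crrLift (l.foldl crrBStep g) := by
  induction l with
  | nil => intro g _; simp
  | cons entry l ih =>
    intro g hne
    simp only [List.foldl_cons]
    have hstep : crrAStep (crrLift g) entry = crrLift (crrBStep g entry) := by
      simp only [crrAStep, crrBStep, PySem.Dict.modify]
      set rt := (PySem.Dict.mk entry).getD "runtime_version" 0 with hrt
      set bn := (PySem.Dict.mk entry).getD "block_number" 0 with hbn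
      rw [crrLift_contains, crrLift_insert]
      cases hc : g.contains rt with
      | true =>
        simp only [if_true]
        obtain ⟨nums, hsome⟩ : ∃ nums, g.get? rt = some nums := by
          cases h : g.get? rt with
          | none =>
            exfalso
            have := PySem.Dict.get?_eq_none_iff_contains (d := g) (k := rt)
            simp [h, hc] at this
          | some v => exact ⟨v, rfl⟩
        have hmem : (rt, nums) ∈ g.items := PySem.Dict.mem_items_of_get?_eq_some g hsome
        obtain ⟨h0, t0, rfl⟩ : ∃ h0 t0, nums = h0 :: t0 := by
          cases nums with
          | nil => exact absurd rfl (hne _ hmem)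
          | cons a b => exact ⟨a, b, rfl⟩
        have hgd : g.getD rt [] = h0 :: t0 := by simp [PySem.Dict.getD, hsome]
        have hgd' : (crrLift g).getD rt PySem.Dict.empty = crrMM (h0 :: t0) := by
          simp [PySem.Dict.getD, crrLift_get?, hsome]
        rw [hgd, hgd', crrMM_step h0 t0 bn]
      | false =>
        simp only [Bool.false_eq_true, if_false]
        have hgd : g.getD rt [] = [] := by
          have := PySem.Dict.get?_eq_none_iff_contains (d := g) (k := rt)
          simp [hc] at this
          simp [PySem.Dict.getD, this]
        rw [hgd]
        congr 1
    rw [hstep]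
    apply ih
    intro p hp
    simp only [crrBStep, PySem.Dict.modify] at hp
    rw [PySem.Dict.mem_items_insert] at hp
    rcases hp with rfl | ⟨hp, _⟩
    · simp
    · exact hne _ hp

-- ===== VERDICT (by name: the statement is the Claim_ definition above) =====
theorem compute_runtime_ranges_spec : Claim_equal_compute_runtime_ranges := by
  intro results _ _
  unfold Spec_compute_runtime_ranges compute_runtime_ranges compute_runtime_ranges_alt
  have h0 : (PySem.Dict.empty : PySem.Dict Int (PySem.Dict String Int)) =
      crrLift PySem.Dict.empty := by simp [crrLift, PySem.Dict.empty]
  rw [h0, crr_loop results PySem.Dict.empty (by simp [PySem.Dict.empty])]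
  simp [crrLift, List.map_map, crrLiftFn, crrMM, Function.comp]
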